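-- pv_equiv track=rewrite | github.com/kunalimbg/pythonTryouts | new_analytics/transaction_pg_to_parquet_new_schema_transaction copy.py | extract_bundle_info
-- ===== SOURCE A (Python) =====
-- def extract_bundle_info(properties):
--     is_bundle = False
--     bundle_id = ""
--
--     for prop in properties:
--         name = prop.get("name")
--         value = prop.get("value")
--
--         if name == "_isYtCustomBundle":
--             if isinstance(value, bool):
--                 is_bundle = value
--             elif isinstance(value, str):
--                 is_bundle = value.lower() == "true"
--
--         elif name == "_bundleId":
--             bundle_id = str(value) if value is not None else ""
--
--     return is_bundle, bundle_id
-- ===== SOURCE B (Python) =====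
-- def extract_bundle_info(properties):
--     # Scan backwards with early exit: the last relevant property wins, so the
--     # first hit in reverse order is the answer for each key.
--     is_bundle = False
--     for prop in reversed(properties):
--         if prop.get("name") == "_isYtCustomBundle" and isinstance(prop.get("value"), (bool, str)):
--             v = prop["value"]
--             is_bundle = v if isinstance(v, bool) else v.lower() == "true"
--             break
--     bundle_id = ""
--     for prop in reversed(properties):
--         if prop.get("name") == "_bundleId":
--             v = prop.get("value")
--             bundle_id = str(v) if v is not None else ""
--             break
--     return is_bundle, bundle_id
-- ===== Notes on version B (the rewrite author's own statement) =====
-- stated objective: alternative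
-- what changed: Replaces A's single forward fold over two accumulators with two backward scans that early-exit at the first (i.e. last-wins) matching property per key.
import Mathlib
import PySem

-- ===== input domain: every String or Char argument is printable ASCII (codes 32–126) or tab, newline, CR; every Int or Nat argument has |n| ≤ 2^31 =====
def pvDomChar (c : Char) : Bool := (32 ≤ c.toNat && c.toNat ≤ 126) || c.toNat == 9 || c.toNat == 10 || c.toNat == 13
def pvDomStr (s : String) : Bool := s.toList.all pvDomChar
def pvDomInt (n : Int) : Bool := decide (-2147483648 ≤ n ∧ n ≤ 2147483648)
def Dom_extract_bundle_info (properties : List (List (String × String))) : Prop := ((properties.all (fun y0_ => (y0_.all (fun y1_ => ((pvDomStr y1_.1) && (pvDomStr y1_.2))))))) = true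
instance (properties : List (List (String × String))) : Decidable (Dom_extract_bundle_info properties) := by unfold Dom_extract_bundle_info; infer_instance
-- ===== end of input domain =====

-- B replaces A's forward fold over two accumulators with two backward scans that
-- early-exit at the first (last-wins) match per key; return values proved equal on Dom.
-- Under the type convention property values are String, so Python's isinstance(value, bool)
-- branch is unreachable and isinstance(value, str) means the "value" key is present.

-- ===== PORT A =====
-- loop body of A: update the (is_bundle, bundle_id) accumulator for one property
def pvStepA (s : Bool × String) (prop : List (String × String)) : Bool × String :=
  let name := prop.lookup "name"
  let value := prop.lookup "value"
  if name == some "_isYtCustomBundle" then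
    match value with
    | some v => (PySem.Str.lower v == "true", s.2)   -- isinstance(value, str) branch
    | none => s                                       -- value is None: neither branch fires
  else if name == some "_bundleId" then
    (s.1, match value with | some v => v | none => "")  -- str(v) = v for a str
  else s

def extract_bundle_info (properties : List (List (String × String))) : Bool × String :=
  properties.foldl pvStepA (false, "")

-- ===== PORT B =====
-- first loop of Source B: first hit in the (already reversed) list, else False
def pvFindFlag : List (List (String × String)) → Bool
  | [] => false
  | prop :: rest =>
    let value := prop.lookup "value"
    if prop.lookup "name" == some "_isYtCustomBundle" && value.isSome then
      PySem.Str.lower (value.getD "") == "true"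
    else pvFindFlag rest

-- second loop of Source B: first hit in the (already reversed) list, else ""
def pvFindId : List (List (String × String)) → String
  | [] => ""
  | prop :: rest =>
    if prop.lookup "name" == some "_bundleId" then
      match prop.lookup "value" with
      | some v => v
      | none => ""
    else pvFindId rest

def extract_bundle_info_alt (properties : List (List (String × String))) : Bool × String :=
  (pvFindFlag properties.reverse, pvFindId properties.reverse)

-- ===== PRECONDITION & SPEC =====
def Spec_extract_bundle_info (properties : List (List (String × String))) (out : Bool × String) : Prop := out = extract_bundle_info_alt properties
instance (properties : List (List (String × String))) (out : Bool × String) : Decidable (Spec_extract_bundle_info properties out) := by unfold Spec_extract_bundle_info; infer_instance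

-- ===== CLAIM (what is proved, stated in full; the proofs are below) =====
def Claim_equal_extract_bundle_info : Prop := ∀ (properties : List (List (String × String))), Dom_extract_bundle_info properties → Spec_extract_bundle_info properties (extract_bundle_info properties)

-- ===== LEMMAS AND PROOFS =====
-- B's scans generalised over the fall-through default
def pvFindFlagD (d : Bool) : List (List (String × String)) → Bool
  | [] => d
  | prop :: rest =>
    let value := prop.lookup "value"
    if prop.lookup "name" == some "_isYtCustomBundle" && value.isSome then
      PySem.Str.lower (value.getD "") == "true"
    else pvFindFlagD d rest

def pvFindIdD (d : String) : List (List (String × String)) → String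
  | [] => d
  | prop :: rest =>
    if prop.lookup "name" == some "_bundleId" then
      match prop.lookup "value" with
      | some v => v
      | none => ""
    else pvFindIdD d rest

theorem pvFindFlagD_false (xs : List (List (String × String))) : pvFindFlagD false xs = pvFindFlag xs := by
  induction xs with
  | nil => rfl
  | cons p rest ih => simp [pvFindFlagD, pvFindFlag, ih]

theorem pvFindIdD_empty (xs : List (List (String × String))) : pvFindIdD "" xs = pvFindId xs := by
  induction xs with
  | nil => rfl
  | cons p rest ih => simp [pvFindIdD, pvFindId, ih]

theorem pvFindFlagD_append (xs ys : List (List (String × String))) (d : Bool) :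
    pvFindFlagD d (xs ++ ys) = pvFindFlagD (pvFindFlagD d ys) xs := by
  induction xs with
  | nil => rfl
  | cons p rest ih => simp only [List.cons_append, pvFindFlagD, ih]

theorem pvFindIdD_append (xs ys : List (List (String × String))) (d : String) :
    pvFindIdD d (xs ++ ys) = pvFindIdD (pvFindIdD d ys) xs := by
  induction xs with
  | nil => rfl
  | cons p rest ih => simp only [List.cons_append, pvFindIdD, ih]

theorem pvStepA_fst (s : Bool × String) (p : List (String × String)) :
    (pvStepA s p).1 = pvFindFlagD s.1 [p] := by
  simp only [pvStepA, pvFindFlagD]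
  rcases hv : p.lookup "value" with _ | v <;>
    rcases hn : p.lookup "name" with _ | n <;>
      simp <;> split_ifs <;> simp_all

theorem pvStepA_snd (s : Bool × String) (p : List (String × String)) :
    (pvStepA s p).2 = pvFindIdD s.2 [p] := by
  simp only [pvStepA, pvFindIdD]
  rcases hv : p.lookup "value" with _ | v <;>
    rcases hn : p.lookup "name" with _ | n <;>
      simp <;> split_ifs <;> simp_all

theorem pv_main (props : List (List (String × String))) (s : Bool × String) :
    props.foldl pvStepA s = (pvFindFlagD s.1 props.reverse, pvFindIdD s.2 props.reverse) := by
  induction props generalizing s with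
  | nil => simp [pvFindFlagD, pvFindIdD]
  | cons p rest ih =>
    simp only [List.foldl_cons, List.reverse_cons, ih,
      pvFindFlagD_append, pvFindIdD_append]
    rw [← pvStepA_fst, ← pvStepA_snd]

-- ===== VERDICT (by name: the statement is the Claim_ definition above) =====
theorem extract_bundle_info_spec : Claim_equal_extract_bundle_info := by
  intro props _
  unfold Spec_extract_bundle_info extract_bundle_info extract_bundle_info_alt
  rw [pv_main, pvFindFlagD_false, pvFindIdD_empty]
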